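-- pv_equiv track=rewrite | github.com/YouriWRV/Linden-IT-exampleCODE | classifier_functions.py | get_act_frequencies
-- ===== SOURCE A (Python) =====
-- def get_act_frequencies(train_file):
--     """ Return all act frequencies (dict) and the total number of acts """
--     act_dictionary = {}
--     number_of_acts = 0
--
--     for i, line in enumerate(train_file):
--         act = line.split(" ")[0]
--         if act in act_dictionary:
--             act_dictionary[act] += 1
--             number_of_acts += 1
--         else:
--             act_dictionary[act] = 1
--             number_of_acts += 1
--     return act_dictionary, number_of_acts
-- ===== SOURCE B (Python) =====
-- def get_act_frequencies(train_file):
--     """ Return all act frequencies (dict) and the total number of acts """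
--     acts = [line.split(" ")[0] for line in train_file]
--     keys = dict.fromkeys(acts)
--     return {k: acts.count(k) for k in keys}, len(acts)
-- ===== Notes on version B (the rewrite author's own statement) =====
-- stated objective: simpler
-- what changed: Instead of A's single loop that conditionally inserts or increments a dict entry and a running counter, B builds the list of first tokens once, dedups it with dict.fromkeys to get keys in first-occurrence order, and maps each key to acts.count(k); the total is len(acts).
import Mathlib
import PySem

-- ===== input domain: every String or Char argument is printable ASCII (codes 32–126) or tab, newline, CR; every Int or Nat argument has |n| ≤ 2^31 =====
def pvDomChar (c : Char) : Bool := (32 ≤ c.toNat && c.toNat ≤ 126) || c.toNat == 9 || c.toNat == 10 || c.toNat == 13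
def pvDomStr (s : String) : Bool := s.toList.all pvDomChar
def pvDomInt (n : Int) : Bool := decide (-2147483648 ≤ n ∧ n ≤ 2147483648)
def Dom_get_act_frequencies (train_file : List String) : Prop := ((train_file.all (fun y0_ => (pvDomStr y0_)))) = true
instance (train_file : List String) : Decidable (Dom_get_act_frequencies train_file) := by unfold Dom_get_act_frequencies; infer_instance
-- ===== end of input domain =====

-- B replaces A's incremental dict-building loop by: collect the first tokens, dedup them
-- with dict.fromkeys, and count each distinct token once — simpler (three lines), not faster.

-- line.split(" ")[0] — split? with the nonempty separator " " always returns `some` of a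
-- nonempty list, so [0] never raises; headD's default is unreachable (exact on all inputs).
def pvFirstTok (line : String) : String :=
  ((PySem.Str.split? line " ").getD []).headD ""

-- ===== PORT A =====
def get_act_frequencies (train_file : List String) : (List (String × Int)) × Int :=
  let st := train_file.foldl
    (fun (st : PySem.Dict String Int × Int) line =>
      let act := pvFirstTok line
      if st.1.contains act then (st.1.modify act 0 (· + 1), st.2 + 1)
      else (st.1.insert act 1, st.2 + 1))
    (PySem.Dict.empty, 0)
  (st.1.items, st.2)

-- ===== PORT B =====
def get_act_frequencies_alt (train_file : List String) : (List (String × Int)) × Int :=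
  let acts := train_file.map pvFirstTok
  let keys := PySem.List.dedup acts          -- dict.fromkeys(acts)
  (keys.map (fun k => (k, (acts.count k : Int))), (acts.length : Int))

-- ===== PRECONDITION & SPEC =====
def Spec_get_act_frequencies (train_file : List String) (out : (List (String × Int)) × Int) : Prop := out = get_act_frequencies_alt train_file
instance (train_file : List String) (out : (List (String × Int)) × Int) : Decidable (Spec_get_act_frequencies train_file out) := by unfold Spec_get_act_frequencies; infer_instance

-- ===== CLAIM (what is proved, stated in full; the proofs are below) =====
def Claim_equal_get_act_frequencies : Prop := ∀ (train_file : List String), Dom_get_act_frequencies train_file → Spec_get_act_frequencies train_file (get_act_frequencies train_file)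

-- ===== LEMMAS AND PROOFS =====

-- the association list A's dict holds after processing the acts of a prefix p
def pvCounterItems (p : List String) : List (String × Int) :=
  (PySem.List.dedup p).map (fun k => (k, (p.count k : Int)))

-- A's loop body, with the act already extracted
def pvStep (st : PySem.Dict String Int × Int) (act : String) : PySem.Dict String Int × Int :=
  if st.1.contains act then (st.1.modify act 0 (· + 1), st.2 + 1)
  else (st.1.insert act 1, st.2 + 1)

lemma dedup_append_singleton (p : List String) (a : String) :
    PySem.List.dedup (p ++ [a]) =
      if a ∈ p then PySem.List.dedup p else PySem.List.dedup p ++ [a] := by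
  simp only [PySem.List.dedup, PySem.Set.ofList, List.foldl_append, List.foldl_cons,
    List.foldl_nil, PySem.Set.add]
  by_cases h : a ∈ p
  · have hc : (PySem.Set.ofList p).contains a = true :=
      (PySem.Set.contains_iff _ a).mpr ((PySem.Set.mem_ofList p a).mpr h)
    simp only [PySem.Set.ofList] at hc
    rw [if_pos hc, if_pos h]
  · have hc : (PySem.Set.ofList p).contains a = false := by
      rw [Bool.eq_false_iff, Ne, PySem.Set.contains_iff, PySem.Set.mem_ofList]
      exact h
    simp only [PySem.Set.ofList] at hc
    rw [if_neg (by rw [hc]; simp), if_neg h]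

lemma find?_beq_self (l : List String) (a : String) (h : a ∈ l) :
    List.find? (fun x => x == a) l = some a := by
  induction l with
  | nil => cases h
  | cons b t ih =>
    by_cases hb : b = a
    · subst hb; simp
    · have : a ∈ t := by
        rcases List.mem_cons.mp h with h' | h'
        · exact absurd h'.symm hb
        · exact h'
      have hba : (b == a) = false := by simp [hb]
      simpa [List.find?, hba] using ih this

lemma find?_counter (p : List String) (a : String) (h : a ∈ p) :
    List.find? (fun q => q.1 == a) (pvCounterItems p) = some (a, (p.count a : Int)) := by
  unfold pvCounterItems
  rw [List.find?_map]
  have ha : a ∈ PySem.List.dedup p := by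
    simpa [PySem.List.dedup] using (PySem.Set.mem_ofList p a).mpr h
  have := find?_beq_self (PySem.List.dedup p) a ha
  rw [Function.comp_def, this]
  rfl

lemma contains_counter (p : List String) (a : String) :
    (PySem.Dict.mk (pvCounterItems p) : PySem.Dict String Int).contains a = decide (a ∈ p) := by
  simp only [PySem.Dict.contains, pvCounterItems, List.any_map, Function.comp_def]
  by_cases h : a ∈ p
  · have ha : a ∈ PySem.List.dedup p := by
      simpa [PySem.List.dedup] using (PySem.Set.mem_ofList p a).mpr h
    simp only [h, decide_true]
    exact List.any_eq_true.mpr ⟨a, ha, by simp⟩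
  · have ha : a ∉ PySem.List.dedup p := fun hm =>
      h ((PySem.Set.mem_ofList p a).mp (by simpa [PySem.List.dedup] using hm))
    simp only [h, decide_false]
    rw [List.any_eq_false]
    intro x hx
    simp only [beq_iff_eq]
    intro hxa
    exact ha (hxa ▸ hx)

lemma step_counter (p : List String) (a : String) :
    pvStep (PySem.Dict.mk (pvCounterItems p), (p.length : Int)) a
      = (PySem.Dict.mk (pvCounterItems (p ++ [a])), ((p ++ [a]).length : Int)) := by
  unfold pvStep
  by_cases h : a ∈ p
  · rw [contains_counter]
    simp only [h, decide_true, if_true]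
    refine Prod.ext ?_ (by simp)
    simp only [PySem.Dict.modify, PySem.Dict.getD, PySem.Dict.get?, find?_counter p a h,
      Option.map_some, Option.getD_some]
    simp only [PySem.Dict.insert, contains_counter, h, decide_true, if_true]
    refine congrArg PySem.Dict.mk ?_
    simp only [pvCounterItems, dedup_append_singleton, h, if_true, List.map_map]
    refine List.map_congr_left ?_
    intro k hk
    simp only [Function.comp]
    by_cases hk' : k = a
    · subst hk'
      simp [List.count_append]
    · simp [hk', List.count_append, Ne.symm hk']
  · rw [contains_counter]
    simp only [h, decide_false]
    refine Prod.ext ?_ (by simp)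
    simp only [PySem.Dict.insert, contains_counter, h, decide_false, Bool.false_eq_true,
      if_false]
    refine congrArg PySem.Dict.mk ?_
    simp only [pvCounterItems, dedup_append_singleton, h, if_false, List.map_append,
      List.map_cons, List.map_nil]
    congr 1
    · refine List.map_congr_left ?_
      intro k hk
      have hkp : k ∈ p := (PySem.Set.mem_ofList p k).mp (by simpa [PySem.List.dedup] using hk)
      have hka : ¬ a = k := fun e => h (e ▸ hkp)
      simp [List.count_append, hka]
    · have : p.count a = 0 := List.count_eq_zero.mpr h
      simp [List.count_append, this]

lemma loop_counter (acts : List String) : ∀ p : List String,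
    acts.foldl pvStep (PySem.Dict.mk (pvCounterItems p), (p.length : Int))
      = (PySem.Dict.mk (pvCounterItems (p ++ acts)), ((p ++ acts).length : Int)) := by
  induction acts with
  | nil => intro p; simp
  | cons a t ih =>
    intro p
    rw [List.foldl_cons, step_counter, ih (p ++ [a])]
    simp

lemma fold_eq_loop (train_file : List String) :
    train_file.foldl
      (fun (st : PySem.Dict String Int × Int) line =>
        let act := pvFirstTok line
        if st.1.contains act then (st.1.modify act 0 (· + 1), st.2 + 1)
        else (st.1.insert act 1, st.2 + 1))
      (PySem.Dict.empty, 0)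
      = (train_file.map pvFirstTok).foldl pvStep (PySem.Dict.mk (pvCounterItems []), (([] : List String).length : Int)) := by
  rw [List.foldl_map]
  rfl

-- ===== VERDICT (by name: the statement is the Claim_ definition above) =====
theorem get_act_frequencies_spec : Claim_equal_get_act_frequencies := by
  intro train_file _
  unfold Spec_get_act_frequencies get_act_frequencies get_act_frequencies_alt
  rw [fold_eq_loop, loop_counter]
  simp [pvCounterItems]
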